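-- pv_equiv track=rewrite | github.com/herzo175/harambe-6 | lstm.py | zip_times
-- ===== SOURCE A (Python) =====
-- def zip_times(datasets):
--     # key must be a key in all other datasets
--     first_dataset = datasets[0]
--     other_datasets = datasets[1:]
--
--     zipped = {}
--
--     for key in first_dataset:
--         add_fields = True
--         # combine fields for each date for all datasets
--         fields = {f: first_dataset[key][f] for f in first_dataset[key]}
--
--         for dataset in other_datasets:
--             if key not in dataset:
--                 add_fields = False
--                 break
--             else:
--                 for f in dataset[key]:
--                     fields[f] = dataset[key][f]
--
--         if add_fields:
--             zipped[key] = fields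
--
--     return zipped
-- ===== SOURCE B (Python) =====
-- def zip_times(datasets):
--     first_dataset = datasets[0]
--     other_datasets = datasets[1:]
--
--     # pass 1: keys present in every dataset
--     common = set(first_dataset)
--     for dataset in other_datasets:
--         common &= set(dataset)
--
--     # pass 2: merge fields for the surviving keys, in first_dataset order
--     zipped = {}
--     for key in first_dataset:
--         if key in common:
--             fields = dict(first_dataset[key])
--             for dataset in other_datasets:
--                 fields.update(dataset[key])
--             zipped[key] = fields
--     return zipped
-- ===== Notes on version B (the rewrite author's own statement) =====
-- stated objective: alternative
-- what changed: B splits the work into two separately-shaped passes: it first computes the set of keys common to all datasets by running set intersection, then in a second pass builds the merged field dict (dict copy + dict.update per dataset) only for keys in that set, instead of A's single interleaved loop with a break flag and per-field copying.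
import Mathlib
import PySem

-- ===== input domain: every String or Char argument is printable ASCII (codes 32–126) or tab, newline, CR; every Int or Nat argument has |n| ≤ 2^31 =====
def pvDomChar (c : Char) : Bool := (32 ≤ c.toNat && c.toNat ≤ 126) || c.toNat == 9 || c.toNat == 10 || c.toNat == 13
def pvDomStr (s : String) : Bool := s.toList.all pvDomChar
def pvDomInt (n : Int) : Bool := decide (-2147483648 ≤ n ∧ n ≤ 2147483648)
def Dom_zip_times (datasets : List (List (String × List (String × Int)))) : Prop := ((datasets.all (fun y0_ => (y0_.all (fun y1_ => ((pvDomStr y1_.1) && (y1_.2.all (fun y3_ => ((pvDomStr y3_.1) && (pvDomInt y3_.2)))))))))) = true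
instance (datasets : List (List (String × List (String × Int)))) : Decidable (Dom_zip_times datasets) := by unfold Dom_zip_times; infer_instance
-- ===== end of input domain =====

-- B replaces A's interleaved membership-check/merge loop with two separate passes: first the
-- set of keys common to all datasets (running set intersection), then the field merge per
-- surviving key (dict copy + update); alternative decomposition, same asymptotic cost.


-- ===== PORT A =====
-- transliteration of A: one loop over the first dataset's keys; per key, copy the field dict,
-- then walk the other datasets with a break flag, merging field-by-field
def zip_times (datasets : List (List (String × List (String × Int)))) : List (String × List (String × Int)) :=
  let first : PySem.Dict String (List (String × Int)) := ⟨(PySem.List.pyGet? datasets 0).getD []⟩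
  let other_datasets : List (PySem.Dict String (List (String × Int))) :=
    (PySem.List.slice datasets (some 1) none).map (fun d => ⟨d⟩)
  let zipped : PySem.Dict String (List (String × Int)) :=
    first.keys.foldl (fun zipped key =>
      -- fields = {f: first_dataset[key][f] for f in first_dataset[key]}
      let kv : PySem.Dict String Int := ⟨(first.get? key).getD []⟩
      let fields : PySem.Dict String Int :=
        kv.keys.foldl (fun acc f => acc.insert f ((kv.get? f).getD 0)) ⟨[]⟩
      -- for dataset in other_datasets: …  (flag models add_fields; a false flag models 'break')
      let st : Bool × PySem.Dict String Int :=
        other_datasets.foldl (fun st dataset =>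
          if st.1 = false then st
          else if dataset.contains key = false then (false, st.2)
          else
            let dv : PySem.Dict String Int := ⟨(dataset.get? key).getD []⟩
            (st.1, dv.keys.foldl (fun fl f => fl.insert f ((dv.get? f).getD 0)) st.2))
          (true, fields)
      if st.1 then zipped.insert key st.2.items else zipped) ⟨[]⟩
  zipped.items

-- ===== PORT B =====
-- transliteration of B (Source B): pass 1 intersects key sets; pass 2 merges fields for common keys
def zip_times_alt (datasets : List (List (String × List (String × Int)))) : List (String × List (String × Int)) :=
  let first : PySem.Dict String (List (String × Int)) := ⟨(PySem.List.pyGet? datasets 0).getD []⟩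
  let rest : List (List (String × List (String × Int))) := PySem.List.slice datasets (some 1) none
  -- common = set(first);  common &= set(dataset) for each other dataset
  let common : PySem.Set String :=
    rest.foldl
      (fun c d => PySem.Set.inter c (PySem.Set.ofList (⟨d⟩ : PySem.Dict String (List (String × Int))).keys))
      (PySem.Set.ofList first.keys)
  let zipped : PySem.Dict String (List (String × Int)) :=
    first.keys.foldl (fun res key =>
      if common.contains key then
        let fields : PySem.Dict String Int :=
          rest.foldl
            (fun fl d => fl.update (((⟨d⟩ : PySem.Dict String (List (String × Int))).get? key).getD []))
            (PySem.Dict.ofList ((first.get? key).getD []))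
        res.insert key fields.items
      else res) ⟨[]⟩
  zipped.items

-- ===== PRECONDITION & SPEC =====
-- Pre_ excludes the empty dataset list, on which A raises IndexError (datasets[0]), and
-- association lists with a duplicated key, which do not represent a Python dict (the dict
-- arguments A receives cannot carry duplicate keys).
def Pre_zip_times (datasets : List (List (String × List (String × Int)))) : Prop :=
  datasets ≠ [] ∧
  ∀ d ∈ datasets, (d.map Prod.fst).Nodup ∧ ∀ p ∈ d, (p.2.map Prod.fst).Nodup
instance (datasets : List (List (String × List (String × Int)))) : Decidable (Pre_zip_times datasets) := by unfold Pre_zip_times; infer_instance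
def pvWitness_zip_times : (List (List (String × List (String × Int)))) :=
  [[("a", [("x", 1), ("y", 2)]), ("b", [("x", 3)])], [("a", [("y", 5)])]]
def Spec_zip_times (datasets : List (List (String × List (String × Int)))) (out : List (String × List (String × Int))) : Prop := out = zip_times_alt datasets
instance (datasets : List (List (String × List (String × Int)))) (out : List (String × List (String × Int))) : Decidable (Spec_zip_times datasets out) := by unfold Spec_zip_times; infer_instance

-- ===== CLAIM (what is proved, stated in full; the proofs are below) =====
def Claim_equal_zip_times : Prop := ∀ (datasets : List (List (String × List (String × Int)))), Dom_zip_times datasets → Pre_zip_times datasets → Spec_zip_times datasets (zip_times datasets)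

-- ===== LEMMAS AND PROOFS =====

-- A's per-key 'copy fields one by one' over a duplicate-free association list is Dict.update
theorem pv_copyfold (l : List (String × Int)) (hn : (l.map Prod.fst).Nodup)
    (acc : PySem.Dict String Int) :
    (⟨l⟩ : PySem.Dict String Int).keys.foldl
      (fun a f => a.insert f (((⟨l⟩ : PySem.Dict String Int).get? f).getD 0)) acc
    = acc.update l := by
  induction l generalizing acc with
  | nil => simp [PySem.Dict.keys_mk, PySem.Dict.update]
  | cons p t ih =>
    obtain ⟨k, v⟩ := p
    simp only [List.map_cons, List.nodup_cons] at hn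
    have hstep :
        ∀ (a : PySem.Dict String Int), ∀ f ∈ (⟨t⟩ : PySem.Dict String Int).keys,
          a.insert f (((⟨(k, v) :: t⟩ : PySem.Dict String Int).get? f).getD 0)
          = a.insert f (((⟨t⟩ : PySem.Dict String Int).get? f).getD 0) := by
      intro a f hf
      rw [PySem.Dict.keys_mk] at hf
      have hkf : (k == f) = false := beq_eq_false_iff_ne.mpr (fun h => hn.1 (h ▸ hf))
      rw [PySem.Dict.get?_mk_cons, hkf]
      simp
    have hkeys : (⟨(k, v) :: t⟩ : PySem.Dict String Int).keys
        = k :: (⟨t⟩ : PySem.Dict String Int).keys := by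
      simp [PySem.Dict.keys_mk]
    rw [hkeys]
    simp only [List.foldl_cons]
    rw [PySem.List.foldl_congr_mem _ _ _ _ hstep, ih hn.2]
    have hget : ((⟨(k, v) :: t⟩ : PySem.Dict String Int).get? k).getD 0 = v := by
      rw [PySem.Dict.get?_mk_cons]; simp
    rw [hget]
    simp [PySem.Dict.update]

-- once A's break flag is false, the rest of the loop does nothing
theorem pv_flag_false (others : List (PySem.Dict String (List (String × Int)))) (key : String)
    (fl : PySem.Dict String Int) :
    others.foldl (fun st dataset =>
        if st.1 = false then st
        else if dataset.contains key = false then (false, st.2)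
        else
          let dv : PySem.Dict String Int := ⟨(dataset.get? key).getD []⟩
          (st.1, dv.keys.foldl (fun a f => a.insert f ((dv.get? f).getD 0)) st.2))
      (false, fl) = (false, fl) := by
  induction others with
  | nil => rfl
  | cons d t ih => simpa using ih

-- when every other dataset contains the key, A's flagged loop is B's plain update fold
theorem pv_flag_all (others : List (PySem.Dict String (List (String × Int)))) (key : String)
    (fl : PySem.Dict String Int)
    (hall : ∀ d ∈ others, d.contains key = true)
    (hnod : ∀ d ∈ others, ∀ p ∈ d.items, (p.2.map Prod.fst).Nodup) :
    others.foldl (fun st dataset =>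
        if st.1 = false then st
        else if dataset.contains key = false then (false, st.2)
        else
          let dv : PySem.Dict String Int := ⟨(dataset.get? key).getD []⟩
          (st.1, dv.keys.foldl (fun a f => a.insert f ((dv.get? f).getD 0)) st.2))
      (true, fl)
    = (true, others.foldl (fun fl d => fl.update ((d.get? key).getD [])) fl) := by
  induction others generalizing fl with
  | nil => rfl
  | cons d t ih =>
    have hd : d.contains key = true := hall d (by simp)
    have hnodv : (((d.get? key).getD []).map Prod.fst).Nodup := by
      rcases hv : d.get? key with _ | v
      · simp
      · simpa using hnod d (by simp) (key, v) (PySem.Dict.mem_items_of_get?_eq_some d hv)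
    simp only [List.foldl_cons, hd, Bool.true_eq_false, if_false]
    rw [pv_copyfold _ hnodv]
    exact ih _ (fun d' hd' => hall d' (by simp [hd'])) (fun d' hd' => hnod d' (by simp [hd']))

-- when some other dataset misses the key, A's flag ends false
theorem pv_flag_miss (others : List (PySem.Dict String (List (String × Int)))) (key : String)
    (fl : PySem.Dict String Int)
    (hmiss : ∃ d ∈ others, d.contains key = false) :
    (others.foldl (fun st dataset =>
        if st.1 = false then st
        else if dataset.contains key = false then (false, st.2)
        else
          let dv : PySem.Dict String Int := ⟨(dataset.get? key).getD []⟩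
          (st.1, dv.keys.foldl (fun a f => a.insert f ((dv.get? f).getD 0)) st.2))
      (true, fl)).1 = false := by
  induction others generalizing fl with
  | nil => simp at hmiss
  | cons d t ih =>
    obtain ⟨d', hd', hc⟩ := hmiss
    rcases hd : d.contains key with _ | _
    · simp only [List.foldl_cons, hd, Bool.true_eq_false, if_false, reduceIte]
      rw [pv_flag_false]
    · have hmem : d' ∈ t := by
        rcases List.mem_cons.mp hd' with h | h
        · rw [h, hd] at hc; cases hc
        · exact h
      simp only [List.foldl_cons, hd, Bool.true_eq_false, if_false]
      exact ih _ ⟨d', hmem, hc⟩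

-- B's running intersection contains a key iff the seed does and every dataset's key set does
theorem pv_common_contains (rest : List (List (String × List (String × Int))))
    (c0 : PySem.Set String) (key : String) :
    (rest.foldl (fun c d =>
        PySem.Set.inter c (PySem.Set.ofList (⟨d⟩ : PySem.Dict String (List (String × Int))).keys)) c0).contains key
    = (c0.contains key &&
        rest.all (fun d => (⟨d⟩ : PySem.Dict String (List (String × Int))).contains key)) := by
  induction rest generalizing c0 with
  | nil => simp
  | cons d t ih =>
    simp only [List.foldl_cons, List.all_cons, ih]
    have hstep : (PySem.Set.inter c0
          (PySem.Set.ofList (⟨d⟩ : PySem.Dict String (List (String × Int))).keys)).contains key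
        = (c0.contains key && (⟨d⟩ : PySem.Dict String (List (String × Int))).contains key) := by
      rw [Bool.eq_iff_iff, Bool.and_eq_true, PySem.Set.contains_iff, PySem.Set.contains_iff,
        PySem.Set.mem_inter]
      constructor
      · rintro ⟨h1, h2⟩
        exact ⟨h1, (PySem.Dict.contains_iff_mem_keys _ _).mpr ((PySem.Set.mem_ofList _ _).mp h2)⟩
      · rintro ⟨h1, h2⟩
        exact ⟨h1, (PySem.Set.mem_ofList _ _).mpr ((PySem.Dict.contains_iff_mem_keys _ _).mp h2)⟩
    rw [hstep, Bool.and_assoc]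

-- ===== VERDICT (by name: the statement is the Claim_ definition above) =====
theorem zip_times_spec : Claim_equal_zip_times := by
  intro datasets _hdom hpre
  obtain ⟨hne, hnod⟩ := hpre
  rcases datasets with _ | ⟨fst, rest⟩
  · exact absurd rfl hne
  simp only [Spec_zip_times, zip_times, zip_times_alt, PySem.List.slice_from_one, List.tail_cons]
  have hget0 : (PySem.List.pyGet? (fst :: rest) 0).getD [] = fst := by
    simp [PySem.List.pyGet?, PySem.List.pyIdx?]
  rw [hget0]
  set first : PySem.Dict String (List (String × Int)) := (⟨fst⟩ : PySem.Dict String (List (String × Int))) with hfirst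
  congr 1
  apply PySem.List.foldl_congr_mem
  intro acc key hkey
  have hcommon := pv_common_contains rest (PySem.Set.ofList first.keys) key
  have hc0 : (PySem.Set.ofList first.keys).contains key = true :=
    (PySem.Set.contains_iff _ _).mpr ((PySem.Set.mem_ofList _ _).mpr hkey)
  rw [hc0, Bool.true_and] at hcommon
  have hkvnod : (((first.get? key).getD []).map Prod.fst).Nodup := by
    rcases hv : first.get? key with _ | v
    · simp
    · exact (hnod fst (by simp)).2 (key, v) (PySem.Dict.mem_items_of_get?_eq_some first hv)
  rw [pv_copyfold _ hkvnod]
  have hofl : PySem.Dict.ofList ((first.get? key).getD [])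
      = PySem.Dict.update (⟨[]⟩ : PySem.Dict String Int) ((first.get? key).getD []) := rfl
  rw [hofl]
  by_cases hall : ∀ d ∈ rest, (⟨d⟩ : PySem.Dict String (List (String × Int))).contains key = true
  · -- key present everywhere: both insert the same merged field dict
    have hallm : ∀ d ∈ rest.map (fun d => (⟨d⟩ : PySem.Dict String (List (String × Int)))),
        d.contains key = true := by
      intro d hd; obtain ⟨l, hl, rfl⟩ := List.mem_map.mp hd; exact hall l hl
    have hnodm : ∀ d ∈ rest.map (fun d => (⟨d⟩ : PySem.Dict String (List (String × Int)))),
        ∀ p ∈ d.items, (p.2.map Prod.fst).Nodup := by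
      intro d hd; obtain ⟨l, hl, rfl⟩ := List.mem_map.mp hd
      exact (hnod l (by simp [hl])).2
    rw [pv_flag_all _ _ _ hallm hnodm]
    have hcom : (rest.foldl (fun c d =>
        PySem.Set.inter c (PySem.Set.ofList (⟨d⟩ : PySem.Dict String (List (String × Int))).keys))
        (PySem.Set.ofList first.keys)).contains key = true := by
      rw [hcommon]; exact List.all_eq_true.mpr hall
    rw [hcom]
    simp only [List.foldl_map, reduceIte]
  · -- key missing somewhere: A's flag ends false, B's intersection test fails
    obtain ⟨d, hd, hdc⟩ : ∃ d ∈ rest,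
        (⟨d⟩ : PySem.Dict String (List (String × Int))).contains key = false := by
      by_contra hno
      exact hall (fun d hd => by
        rcases hb : (⟨d⟩ : PySem.Dict String (List (String × Int))).contains key with _ | _
        · exact absurd ⟨d, hd, hb⟩ hno
        · rfl)
    have hmiss : ∃ d' ∈ rest.map (fun d => (⟨d⟩ : PySem.Dict String (List (String × Int)))),
        d'.contains key = false :=
      ⟨⟨d⟩, List.mem_map.mpr ⟨d, hd, rfl⟩, hdc⟩
    have hflag := pv_flag_miss (rest.map (fun d => (⟨d⟩ : PySem.Dict String (List (String × Int)))))
      key (PySem.Dict.update (⟨[]⟩ : PySem.Dict String Int) ((first.get? key).getD [])) hmiss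
    have hcom : (rest.foldl (fun c d =>
        PySem.Set.inter c (PySem.Set.ofList (⟨d⟩ : PySem.Dict String (List (String × Int))).keys))
        (PySem.Set.ofList first.keys)).contains key = false := by
      rw [hcommon, Bool.eq_false_iff]
      intro h
      rw [List.all_eq_true.mp h d hd] at hdc; cases hdc
    rw [hcom]
    rw [if_neg (by rw [hflag]; simp)]
    simp
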